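-- pv_equiv track=rewrite | github.com/jpegame/Atividades_ADS | lista_recursao/ex12.py | existePositivo
-- ===== SOURCE A (Python) =====
-- def existePositivo(lista):
--     primeira_sublista, *resto_sublistas = lista
--     for numero in primeira_sublista:
--         if numero > 0:
--             if len(resto_sublistas) == 0:
--                 return True
--             return existePositivo(resto_sublistas)
--
--     return False
-- ===== SOURCE B (Python) =====
-- def existePositivo(lista):
--     # iterative version: same ValueError on empty input via the unpack
--     primeira_sublista, *resto = lista
--     while True:
--         if any(n > 0 for n in primeira_sublista):
--             if not resto:
--                 return True
--             primeira_sublista, *resto = resto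
--         else:
--             return False
-- ===== Notes on version B (the rewrite author's own statement) =====
-- stated objective: idiomatic
-- what changed: Tail recursion with a hand-written inner scan replaced by an explicit while-loop with any(); the unpack preserves the ValueError on empty input.
import Mathlib
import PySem

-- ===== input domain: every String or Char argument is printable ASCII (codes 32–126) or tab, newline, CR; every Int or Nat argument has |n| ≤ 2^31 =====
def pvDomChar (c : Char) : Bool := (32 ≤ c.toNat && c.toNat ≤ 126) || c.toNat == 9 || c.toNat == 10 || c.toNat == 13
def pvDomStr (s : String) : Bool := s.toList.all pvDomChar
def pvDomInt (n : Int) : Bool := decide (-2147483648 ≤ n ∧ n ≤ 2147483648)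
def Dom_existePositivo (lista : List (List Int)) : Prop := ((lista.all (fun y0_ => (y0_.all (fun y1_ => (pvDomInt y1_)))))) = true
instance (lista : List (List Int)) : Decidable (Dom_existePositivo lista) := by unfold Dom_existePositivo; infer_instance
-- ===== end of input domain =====

-- B replaces A's tail recursion and hand-written inner scan by an explicit loop using any();
-- equivalence is on the return value, on non-empty input (both raise ValueError on []).

-- ===== PORT A =====
-- inner 'for numero in primeira_sublista: if numero > 0: …' early-exit scan
def scanPosA : List Int → Bool
  | [] => false
  | numero :: rest => if numero > 0 then true else scanPosA rest

def existePositivo (lista : List (List Int)) : Bool :=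
  match lista with
  | [] => false  -- Python raises ValueError here; excluded by Pre_
  | primeira_sublista :: resto_sublistas =>
    if scanPosA primeira_sublista then
      if resto_sublistas.length = 0 then true else existePositivo resto_sublistas
    else false

-- ===== PORT B =====
-- the 'while True' loop, state = (primeira_sublista, resto)
def altLoop (primeira : List Int) (resto : List (List Int)) : Bool :=
  if primeira.any (fun n => decide (n > 0)) then
    match resto with
    | [] => true
    | p :: r => altLoop p r
  else false

def existePositivo_alt (lista : List (List Int)) : Bool :=
  match lista with
  | [] => false  -- the unpack raises ValueError here; excluded by Pre_
  | p :: r => altLoop p r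

-- ===== PRECONDITION & SPEC =====
-- Pre_: the unpack 'primeira_sublista, *resto = lista' raises ValueError on the empty list (in both A and B)
def Pre_existePositivo (lista : List (List Int)) : Prop := lista ≠ []
instance (lista : List (List Int)) : Decidable (Pre_existePositivo lista) := by unfold Pre_existePositivo; infer_instance
def pvWitness_existePositivo : List (List Int) := [[-1, 2], [0]]
def Spec_existePositivo (lista : List (List Int)) (out : Bool) : Prop := out = existePositivo_alt lista
instance (lista : List (List Int)) (out : Bool) : Decidable (Spec_existePositivo lista out) := by unfold Spec_existePositivo; infer_instance

-- ===== CLAIM (what is proved, stated in full; the proofs are below) =====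
def Claim_equal_existePositivo : Prop := ∀ (lista : List (List Int)), Dom_existePositivo lista → Pre_existePositivo lista → Spec_existePositivo lista (existePositivo lista)

-- ===== LEMMAS AND PROOFS =====
theorem scanPosA_eq_any (l : List Int) : scanPosA l = l.any (fun n => decide (n > 0)) := by
  induction l with
  | nil => rfl
  | cons n rest ih => by_cases h : n > 0 <;> simp [scanPosA, h, ih]

theorem existePositivo_cons (p : List Int) (r : List (List Int)) :
    existePositivo (p :: r) =
      if scanPosA p then (if r.length = 0 then true else existePositivo r) else false := rfl

theorem altLoop_nil (p : List Int) :
    altLoop p [] = if p.any (fun n => decide (n > 0)) then true else false := rfl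

theorem altLoop_cons (p q : List Int) (r' : List (List Int)) :
    altLoop p (q :: r') = if p.any (fun n => decide (n > 0)) then altLoop q r' else false := rfl

theorem existePositivo_cons_eq_altLoop (p : List Int) (r : List (List Int)) :
    existePositivo (p :: r) = altLoop p r := by
  induction r generalizing p with
  | nil => rw [existePositivo_cons, altLoop_nil, scanPosA_eq_any]; simp
  | cons q r' ih =>
    have e1 : existePositivo (p :: q :: r') =
        if (p.any fun n => decide (n > 0)) = true then existePositivo (q :: r') else false := by
      rw [existePositivo_cons, scanPosA_eq_any]
      by_cases h : (p.any fun n => decide (n > 0)) = true <;> simp [h]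
    rw [e1, ih q, altLoop_cons]

-- ===== VERDICT (by name: the statement is the Claim_ definition above) =====
theorem existePositivo_spec : Claim_equal_existePositivo := by
  intro lista _ hpre
  unfold Spec_existePositivo
  match lista with
  | [] => exact absurd rfl hpre
  | p :: r => rw [existePositivo_cons_eq_altLoop]; rfl
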